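-- pv_equiv track=rewrite | github.com/neuer/zhixi | app/processor/json_validator.py | _fix_brackets
-- ===== SOURCE A (Python) =====
-- def _fix_brackets(text: str) -> str:
--     """补全未闭合的括号，使用栈追踪嵌套顺序。"""
--     stack: list[str] = []
--     in_string = False
--     escape = False
--     for ch in text:
--         if escape:
--             escape = False
--             continue
--         if ch == "\\" and in_string:
--             escape = True
--             continue
--         if ch == '"':
--             in_string = not in_string
--             continue
--         if in_string:
--             continue
--         if ch in ("{", "["):
--             stack.append("}" if ch == "{" else "]")
--         elif ch in ("}", "]") and stack and stack[-1] == ch: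
--             stack.pop()
--     return text + "".join(reversed(stack))
-- ===== SOURCE B (Python) =====
-- def _strip_strings(text: str) -> str:
--     """Remove JSON string literals (handling escapes) in one index-driven scan."""
--     out = []
--     i, n = 0, len(text)
--     while i < n:
--         if text[i] != '"':
--             out.append(text[i])
--             i += 1
--             continue
--         i += 1  # skip the opening quote
--         while i < n:
--             if text[i] == '"':
--                 i += 1
--                 break
--             if text[i] == '\\':
--                 if i + 1 < n:
--                     i += 2
--                 else:
--                     break  # lone trailing backslash: leave it for the outer scan
--             else:
--                 i += 1
--     return ''.join(out)
--
--
-- def _fix_brackets(text: str) -> str: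
--     """Strip string literals first, then balance brackets over the cleaned text."""
--     stack = []
--     for ch in _strip_strings(text):
--         if ch in '{[':
--             stack.append('}' if ch == '{' else ']')
--         elif ch in '}]' and stack and ch == stack[-1]:
--             stack.pop()
--     return text + ''.join(reversed(stack))
-- ===== Notes on version B (the rewrite author's own statement) =====
-- stated objective: alternative
-- what changed: B splits A's single inline in_string/escape state machine into two separate passes: an index-driven scanner that removes JSON string literals first, then a plain bracket-balancing stack loop over the cleaned text.
import Mathlib
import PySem

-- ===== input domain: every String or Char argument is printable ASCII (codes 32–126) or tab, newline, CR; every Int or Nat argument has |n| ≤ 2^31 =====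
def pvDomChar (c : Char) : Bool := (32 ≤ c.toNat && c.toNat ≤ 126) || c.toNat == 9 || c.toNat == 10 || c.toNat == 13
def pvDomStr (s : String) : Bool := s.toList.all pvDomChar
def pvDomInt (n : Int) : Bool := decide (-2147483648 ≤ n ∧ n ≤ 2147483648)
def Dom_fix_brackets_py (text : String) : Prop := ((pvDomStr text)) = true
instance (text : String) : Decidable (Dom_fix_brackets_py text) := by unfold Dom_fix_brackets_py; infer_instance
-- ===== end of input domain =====

-- B replaces A's inline in_string/escape state machine by two separate passes
-- (strip string literals, then balance brackets); objective: alternative decomposition.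

-- ===== PORT A =====
-- one step of A's for-loop: state = (stack, in_string, escape)
def fixStepA (st : List Char × Bool × Bool) (ch : Char) : List Char × Bool × Bool :=
  let stack := st.1
  let in_string := st.2.1
  let escape := st.2.2
  if escape then (stack, in_string, false)
  else if ch = '\\' ∧ in_string then (stack, in_string, true)
  else if ch = '"' then (stack, !in_string, escape)
  else if in_string then (stack, in_string, escape)
  else if ch = '{' ∨ ch = '[' then (stack ++ [if ch = '{' then '}' else ']'], in_string, escape)
  else if (ch = '}' ∨ ch = ']') ∧ stack ≠ [] ∧ stack.getLast? = some ch then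
    (stack.dropLast, in_string, escape)
  else (stack, in_string, escape)

def fix_brackets_py (text : String) : String :=
  text ++ String.ofList (text.toList.foldl fixStepA ([], false, false)).1.reverse

-- ===== PORT B =====
-- inner while-loop of _strip_strings: consume a string literal, return the remaining text
def skipStr : List Char → List Char
  | [] => []
  | c :: rest =>
    if c = '"' then rest
    else if c = '\\' then
      match rest with
      | [] => ['\\']            -- lone trailing backslash: left for the outer scan
      | _ :: rest' => skipStr rest'
    else skipStr rest

theorem skipStr_length_le : ∀ cs : List Char, (skipStr cs).length ≤ cs.length := by
  intro cs
  induction cs using skipStr.induct with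
  | _ => rw [skipStr.eq_def] <;> simp_all <;> omega

-- outer while-loop of _strip_strings
def stripStrs : List Char → List Char
  | [] => []
  | c :: rest =>
    if c = '"' then stripStrs (skipStr rest)
    else c :: stripStrs rest
termination_by cs => cs.length
decreasing_by
  · exact Nat.lt_succ_of_le (skipStr_length_le rest)
  · simp

-- one step of B's bracket-balancing loop
def fixStepB (stack : List Char) (ch : Char) : List Char :=
  if ch = '{' ∨ ch = '[' then stack ++ [if ch = '{' then '}' else ']']
  else if (ch = '}' ∨ ch = ']') ∧ stack ≠ [] ∧ stack.getLast? = some ch then stack.dropLast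
  else stack

def fix_brackets_py_alt (text : String) : String :=
  text ++ String.ofList ((stripStrs text.toList).foldl fixStepB []).reverse

-- ===== PRECONDITION & SPEC =====
def Spec_fix_brackets_py (text : String) (out : String) : Prop := out = fix_brackets_py_alt text
instance (text : String) (out : String) : Decidable (Spec_fix_brackets_py text out) := by unfold Spec_fix_brackets_py; infer_instance

-- ===== CLAIM (what is proved, stated in full; the proofs are below) =====
def Claim_equal_fix_brackets_py : Prop := ∀ (text : String), Dom_fix_brackets_py text → Spec_fix_brackets_py text (fix_brackets_py text)

-- ===== LEMMAS AND PROOFS =====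

-- outside strings, one step of A acts on the stack exactly like one step of B
theorem stepA_out (stack : List Char) (c : Char) (hc : c ≠ '"') :
    fixStepA (stack, false, false) c = (fixStepB stack c, false, false) := by
  simp only [fixStepA, fixStepB, hc]
  simp
  split_ifs <;> rfl

-- main invariant: A's fold from the "outside string" state matches B's fold over the
-- stripped text; from the "inside string, no escape" state it matches B's fold over
-- the text after the string literal is skipped.
theorem fold_agree : ∀ (n : ℕ) (cs : List Char), cs.length ≤ n → ∀ stack : List Char,
    ((cs.foldl fixStepA (stack, false, false)).1 = (stripStrs cs).foldl fixStepB stack)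
    ∧ ((cs.foldl fixStepA (stack, true, false)).1 = (stripStrs (skipStr cs)).foldl fixStepB stack) := by
  intro n
  induction n with
  | zero =>
      intro cs hlen stack
      have : cs = [] := List.eq_nil_of_length_eq_zero (Nat.le_zero.mp hlen)
      subst this
      simp [stripStrs, skipStr]
  | succ n ih =>
      intro cs hlen stack
      match cs with
      | [] => simp [stripStrs, skipStr]
      | c :: rest =>
        have hrest : rest.length ≤ n := by simpa using Nat.lt_succ_iff.mp (Nat.lt_of_lt_of_le (by simp) hlen)
        constructor
        · -- outside a string
          by_cases hc : c = '"'
          · subst hc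
            have h1 : fixStepA (stack, false, false) '"' = (stack, true, false) := by
              simp [fixStepA]
            have h2 : stripStrs ('"' :: rest) = stripStrs (skipStr rest) := by
              rw [stripStrs.eq_def]; simp
            rw [List.foldl_cons, h1, h2]
            exact (ih rest hrest stack).2
          · have h2 : stripStrs (c :: rest) = c :: stripStrs rest := by
              rw [stripStrs.eq_def]; simp [hc]
            rw [List.foldl_cons, stepA_out stack c hc, h2, List.foldl_cons]
            exact (ih rest hrest (fixStepB stack c)).1
        · -- inside a string, no pending escape
          by_cases hc : c = '"'
          · subst hc
            have h1 : fixStepA (stack, true, false) '"' = (stack, false, false) := by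
              simp [fixStepA]
            have h2 : skipStr ('"' :: rest) = rest := by rw [skipStr.eq_def]; simp
            rw [List.foldl_cons, h1, h2]
            exact (ih rest hrest stack).1
          · by_cases hb : c = '\\'
            · subst hb
              have h1 : fixStepA (stack, true, false) '\\' = (stack, true, true) := by
                simp [fixStepA]
              match rest with
              | [] =>
                  rw [List.foldl_cons, h1]
                  have e1 : skipStr ['\\'] = ['\\'] := by rw [skipStr.eq_def]; simp
                  have e2 : stripStrs ['\\'] = ['\\'] := by
                    rw [stripStrs.eq_def]; simp [stripStrs]
                  rw [e1, e2]
                  simp [fixStepB]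
              | c2 :: rest' =>
                  have h2 : fixStepA (stack, true, true) c2 = (stack, true, false) := by
                    simp [fixStepA]
                  rw [List.foldl_cons, h1, List.foldl_cons, h2]
                  have hrest' : rest'.length ≤ n := by
                    simp only [List.length_cons] at hlen hrest ⊢
                    omega
                  have hskip : skipStr ('\\' :: c2 :: rest') = skipStr rest' := by
                    rw [skipStr.eq_def]; simp
                  rw [hskip]
                  exact (ih rest' hrest' stack).2
            · have h1 : fixStepA (stack, true, false) c = (stack, true, false) := by
                simp [fixStepA, hc, hb]
              have hskip : skipStr (c :: rest) = skipStr rest := by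
                rw [skipStr.eq_def]; simp [hc, hb]
              rw [List.foldl_cons, h1, hskip]
              exact (ih rest hrest stack).2

-- ===== VERDICT (by name: the statement is the Claim_ definition above) =====
theorem fix_brackets_py_spec : Claim_equal_fix_brackets_py := by
  intro text _
  unfold Spec_fix_brackets_py fix_brackets_py fix_brackets_py_alt
  rw [(fold_agree text.toList.length text.toList le_rfl []).1]
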